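-- pv_equiv track=rewrite | github.com/nichind/ege-2024 | variants-kege/25039931/n23.py | f
-- ===== SOURCE A (Python) =====
-- def f(start, final,
--       flag=False):
--     if start == 10:
--         flag = True
--     if (start == final) and flag:
--         return 1
--     if start > final or start == 11 or start == 12:
--         return 0
--     return f(start + 1, final, flag) + f(start * 2, final, flag) + f(start**2, final, flag)
-- ===== SOURCE B (Python) =====
-- def f(start, final, flag=False):
--     if start == 10:
--         flag = True
--     if start == final and flag:
--         return 1
--     if start > final or start == 11 or start == 12:
--         return 0
--     # bottom-up DP over the states start..final, one pass, two tables: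
--     # T[s] = number of paths from s to final with the flag already set,
--     # F[s] = number of paths from s to final with the flag not yet set.
--     T = {}
--     F = {}
--     for s in range(final, start - 1, -1):
--         if s == final:
--             t = 1
--         elif s == 11 or s == 12:
--             t = 0
--         else:
--             t = T.get(s + 1, 0) + T.get(s * 2, 0) + T.get(s * s, 0)
--         if s == 10:
--             fv = t
--         elif s == 11 or s == 12:
--             fv = 0
--         elif s == final:
--             fv = 0
--         else:
--             fv = F.get(s + 1, 0) + F.get(s * 2, 0) + F.get(s * s, 0)
--         T[s] = t
--         F[s] = fv
--     return T[start] if flag else F[start]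
-- ===== Notes on version B (the rewrite author's own statement) =====
-- stated objective: faster
-- what changed: A's exponential three-way recursion (one call per path) is replaced by a single bottom-up dynamic-programming pass from final down to start with two tables (flag already set / not yet set), so each state is computed once.
import Mathlib
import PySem

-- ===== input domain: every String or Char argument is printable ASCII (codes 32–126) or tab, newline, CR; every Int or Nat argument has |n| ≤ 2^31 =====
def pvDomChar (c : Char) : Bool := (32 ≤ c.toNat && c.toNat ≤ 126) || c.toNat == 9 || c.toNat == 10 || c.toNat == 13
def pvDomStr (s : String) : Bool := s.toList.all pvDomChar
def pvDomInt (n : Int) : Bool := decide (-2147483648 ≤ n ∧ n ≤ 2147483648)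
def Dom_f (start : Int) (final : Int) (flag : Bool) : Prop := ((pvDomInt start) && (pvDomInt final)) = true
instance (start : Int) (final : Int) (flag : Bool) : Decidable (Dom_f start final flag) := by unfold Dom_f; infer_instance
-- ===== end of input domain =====

-- B replaces A's exponential three-way recursion by a single bottom-up DP pass with two tables (flag set / not set).

-- ===== PORT A =====
-- Literal port of A's recursion; the recursion diverges off Pre_f, so a fuel
-- parameter makes the same computation total (the fuel passed by `f` is ample
-- on every input satisfying Pre_f; each step start strictly increases there).
def fAux : Nat → Int → Int → Bool → Int
  | 0, _, _, _ => 0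
  | fuel+1, start, final, flag0 =>
    let flag := if start = 10 then true else flag0
    if start = final ∧ flag = true then 1
    else if start > final ∨ start = 11 ∨ start = 12 then 0
    else fAux fuel (start+1) final flag + fAux fuel (start*2) final flag
         + fAux fuel (start*start) final flag

def f (start : Int) (final : Int) (flag : Bool) : Int :=
  fAux ((final - start).toNat + 1) start final flag

-- ===== PORT B =====
-- one loop-body step of Source B's DP: TF = (T, F), processed state s
def stepB (final : Int) (TF : PySem.Dict Int Int × PySem.Dict Int Int) (s : Int) :
    PySem.Dict Int Int × PySem.Dict Int Int :=
  let t : Int :=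
    if s = final then 1
    else if s = 11 ∨ s = 12 then 0
    else TF.1.getD (s+1) 0 + TF.1.getD (s*2) 0 + TF.1.getD (s*s) 0
  let fv : Int :=
    if s = 10 then t
    else if s = 11 ∨ s = 12 then 0
    else if s = final then 0
    else TF.2.getD (s+1) 0 + TF.2.getD (s*2) 0 + TF.2.getD (s*s) 0
  (TF.1.insert s t, TF.2.insert s fv)

def f_alt (start : Int) (final : Int) (flag0 : Bool) : Int :=
  let flag := if start = 10 then true else flag0
  if start = final ∧ flag = true then 1
  else if start > final ∨ start = 11 ∨ start = 12 then 0
  else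
    let TF := (PySem.List.pyRange final (start-1) (-1)).foldl (stepB final)
                (PySem.Dict.empty, PySem.Dict.empty)
    -- T[start] / F[start]: the key start was inserted by the last iteration, so
    -- Python's T[start] cannot raise here; getD is exact.
    if flag then TF.1.getD start 0 else TF.2.getD start 0

-- ===== PRECONDITION & SPEC =====
-- Pre_f excludes exactly the inputs on which A's recursion never terminates
-- (Python RecursionError): start ≤ 1 with start ≤ final and no immediate return.
def Pre_f (start : Int) (final : Int) (flag : Bool) : Prop :=
  2 ≤ start ∨ final < start ∨ (start = final ∧ flag = true)
instance (start : Int) (final : Int) (flag : Bool) : Decidable (Pre_f start final flag) := by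
  unfold Pre_f; infer_instance

def pvWitness_f : Int × Int × Bool := (2, 5, false)

def Spec_f (start : Int) (final : Int) (flag : Bool) (out : Int) : Prop := out = f_alt start final flag
instance (start : Int) (final : Int) (flag : Bool) (out : Int) : Decidable (Spec_f start final flag out) := by unfold Spec_f; infer_instance

-- ===== CLAIM (what is proved, stated in full; the proofs are below) =====
def Claim_equal_f : Prop := ∀ (start : Int) (final : Int) (flag : Bool), Dom_f start final flag → Pre_f start final flag → Spec_f start final flag (f start final flag)

-- ===== LEMMAS AND PROOFS =====

-- mathematical value of A's recursion, by well-founded recursion (guards s < c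
-- make it total; for 2 ≤ s the guards agree with A's "child beyond final gives 0")
def G (final : Int) (s : Int) (flag : Bool) : Int :=
  if s = final ∧ (if s = 10 then true else flag) = true then 1
  else if s > final ∨ s = 11 ∨ s = 12 then 0
  else (if h : s < s+1 ∧ s+1 ≤ final then G final (s+1) (if s = 10 then true else flag) else 0)
     + (if h : s < s*2 ∧ s*2 ≤ final then G final (s*2) (if s = 10 then true else flag) else 0)
     + (if h : s < s*s ∧ s*s ≤ final then G final (s*s) (if s = 10 then true else flag) else 0)
termination_by (final - s).toNat
decreasing_by
  · omega
  · omega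
  · obtain ⟨h1, h2⟩ := h; generalize s*s = c at h1 h2 ⊢; omega

lemma G_final (final s : Int) (flag : Bool) (h : s = final)
    (hfl : (if s = 10 then true else flag) = true) : G final s flag = 1 := by
  rw [G.eq_def, if_pos ⟨h, hfl⟩]

lemma G_stop (final s : Int) (flag : Bool)
    (h1 : ¬(s = final ∧ (if s = 10 then true else flag) = true))
    (h2 : s > final ∨ s = 11 ∨ s = 12) : G final s flag = 0 := by
  rw [G.eq_def, if_neg h1, if_pos h2]

lemma G_step (final s : Int) (flag : Bool)
    (h1 : ¬(s = final ∧ (if s = 10 then true else flag) = true))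
    (h2 : ¬(s > final ∨ s = 11 ∨ s = 12)) : G final s flag =
    (if h : s < s+1 ∧ s+1 ≤ final then G final (s+1) (if s = 10 then true else flag) else 0)
     + (if h : s < s*2 ∧ s*2 ≤ final then G final (s*2) (if s = 10 then true else flag) else 0)
     + (if h : s < s*s ∧ s*s ≤ final then G final (s*s) (if s = 10 then true else flag) else 0) := by
  rw [G.eq_def, if_neg h1, if_neg h2]

lemma G_ten (final : Int) (b : Bool) : G final 10 b = G final 10 true := by
  conv_lhs => rw [G.eq_def]
  conv_rhs => rw [G.eq_def]
  norm_num

lemma fAux_of_gt (fuel : Nat) (s final : Int) (flag : Bool) (h : final < s) :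
    fAux fuel s final flag = 0 := by
  cases fuel with
  | zero => rfl
  | succ n =>
    simp only [fAux]
    rw [if_neg (by rintro ⟨h1, -⟩; omega), if_pos (Or.inl h)]

lemma fAux_eq_G (final : Int) : ∀ (fuel : Nat) (s : Int) (flag : Bool), 2 ≤ s →
    (final - s).toNat < fuel → fAux fuel s final flag = G final s flag := by
  intro fuel
  induction fuel with
  | zero => intro s flag _ hf; exact absurd hf (Nat.not_lt_zero _)
  | succ n ih =>
    intro s flag hs hf
    simp only [fAux]
    by_cases h1 : s = final ∧ (if s = 10 then true else flag) = true
    · rw [if_pos h1, G_final final s flag h1.1 h1.2]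
    · rw [if_neg h1]
      by_cases h2 : s > final ∨ s = 11 ∨ s = 12
      · rw [if_pos h2, G_stop final s flag h1 h2]
      · rw [if_neg h2, G_step final s flag h1 h2]
        have hle : s ≤ final := by omega
        have hss : s < s*s ∧ 2 ≤ s*s := by constructor <;> nlinarith
        congr 1
        · congr 1
          · by_cases hc : s+1 ≤ final
            · rw [dif_pos ⟨by omega, hc⟩]; exact ih (s+1) _ (by omega) (by omega)
            · rw [dif_neg (by omega)]; exact fAux_of_gt _ _ _ _ (by omega)
          · by_cases hc : s*2 ≤ final
            · rw [dif_pos ⟨by omega, hc⟩]; exact ih (s*2) _ (by omega) (by omega)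
            · rw [dif_neg (by omega)]; exact fAux_of_gt _ _ _ _ (by omega)
        · by_cases hc : s*s ≤ final
          · rw [dif_pos ⟨hss.1, hc⟩]
            exact ih (s*s) _ hss.2 (by obtain ⟨h1', _⟩ := hss; generalize s*s = c at *; omega)
          · rw [dif_neg (fun h => hc h.2)]
            exact fAux_of_gt _ _ _ _ (by omega)

lemma t_correct (final k : Int) (T : PySem.Dict Int Int)
    (hk : 2 ≤ k) (hkf : k ≤ final)
    (hT : ∀ c, T.getD c 0 = if k+1 ≤ c ∧ c ≤ final then G final c true else 0) :
    (if k = final then (1:Int) else if k = 11 ∨ k = 12 then 0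
      else T.getD (k+1) 0 + T.getD (k*2) 0 + T.getD (k*k) 0) = G final k true := by
  by_cases h1 : k = final
  · rw [if_pos h1, G_final final k true h1 (by simp)]
  · rw [if_neg h1]
    have h1' : ¬(k = final ∧ (if k = 10 then true else true) = true) := fun h => h1 h.1
    by_cases h2 : k = 11 ∨ k = 12
    · rw [if_pos h2, G_stop final k true h1' (Or.inr h2)]
    · rw [if_neg h2, G_step final k true h1' (by omega)]
      simp only [ite_self]
      rw [hT (k+1), hT (k*2), hT (k*k)]
      simp only [dite_eq_ite, Int.lt_iff_add_one_le]

lemma fv_correct (final k : Int) (F : PySem.Dict Int Int) (t : Int)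
    (hk : 2 ≤ k) (hkf : k ≤ final) (ht : t = G final k true)
    (hF : ∀ c, F.getD c 0 = if k+1 ≤ c ∧ c ≤ final then G final c false else 0) :
    (if k = 10 then t else if k = 11 ∨ k = 12 then (0:Int) else if k = final then 0
      else F.getD (k+1) 0 + F.getD (k*2) 0 + F.getD (k*k) 0) = G final k false := by
  by_cases h10 : k = 10
  · rw [if_pos h10, ht, h10]; exact (G_ten final false).symm
  · rw [if_neg h10]
    have h1' : ¬(k = final ∧ (if k = 10 then true else false) = true) := by simp [h10]
    by_cases h2 : k = 11 ∨ k = 12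
    · rw [if_pos h2, G_stop final k false h1' (Or.inr h2)]
    · rw [if_neg h2]
      by_cases h1 : k = final
      · rw [if_pos h1, G_step final k false h1' (by omega)]
        rw [dif_neg (by omega), dif_neg (by rintro ⟨a, b⟩; omega),
            dif_neg (by rintro ⟨a, b⟩; generalize k*k = c at a b; omega)]
        norm_num
      · rw [if_neg h1, G_step final k false h1' (by omega)]
        simp only [if_neg h10]
        rw [hF (k+1), hF (k*2), hF (k*k)]
        simp only [dite_eq_ite, Int.lt_iff_add_one_le]

lemma loop_invariant (final : Int) : ∀ (n : Nat) (k : Int), (final + 1 - k).toNat = n → 2 ≤ k →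
    ∀ s : Int,
      (((PySem.List.pyRange final (k-1) (-1)).foldl (stepB final)
          (PySem.Dict.empty, PySem.Dict.empty)).1.getD s 0
        = if k ≤ s ∧ s ≤ final then G final s true else 0)
      ∧ (((PySem.List.pyRange final (k-1) (-1)).foldl (stepB final)
          (PySem.Dict.empty, PySem.Dict.empty)).2.getD s 0
        = if k ≤ s ∧ s ≤ final then G final s false else 0) := by
  intro n
  induction n with
  | zero =>
    intro k hn hk s
    have hkf : final < k := by omega
    rw [PySem.List.pyRange_neg_one_eq_nil (by omega)]
    simp only [List.foldl_nil, PySem.Dict.getD_empty]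
    rw [if_neg (by omega), if_neg (by omega)]
    exact ⟨rfl, rfl⟩
  | succ n ih =>
    intro k hn hk s
    have hkf : k ≤ final := by omega
    have hsplit : PySem.List.pyRange final (k-1) (-1)
        = PySem.List.pyRange final k (-1) ++ [k] := by
      rw [PySem.List.pyRange_neg_one_eq_reverse, PySem.List.pyRange_neg_one_eq_reverse]
      have h1 : k - 1 + 1 = k := by ring
      rw [h1, PySem.List.pyRange_one_cons (by omega)]
      simp
    have hprev : PySem.List.pyRange final k (-1)
        = PySem.List.pyRange final ((k+1)-1) (-1) := by norm_num
    rw [hsplit, List.foldl_append, hprev]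
    have ihT := fun s => (ih (k+1) (by omega) (by omega) s).1
    have ihF := fun s => (ih (k+1) (by omega) (by omega) s).2
    set P := (PySem.List.pyRange final ((k+1)-1) (-1)).foldl (stepB final)
        (PySem.Dict.empty, PySem.Dict.empty) with hP
    simp only [List.foldl_cons, List.foldl_nil]
    have ihT' : ∀ c, P.1.getD c 0 = if k+1 ≤ c ∧ c ≤ final then G final c true else 0 := by
      intro c; rw [ihT c]
    have ihF' : ∀ c, P.2.getD c 0 = if k+1 ≤ c ∧ c ≤ final then G final c false else 0 := by
      intro c; rw [ihF c]
    have ht := t_correct final k P.1 hk hkf ihT'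
    have hfv := fv_correct final k P.2 _ hk hkf ht ihF'
    simp only [stepB]
    rw [PySem.Dict.getD_insert, PySem.Dict.getD_insert]
    constructor
    · by_cases hs : s = k
      · rw [if_pos hs, ht, hs, if_pos (show k ≤ k ∧ k ≤ final from ⟨le_refl _, hkf⟩)]
      · rw [if_neg hs, ihT' s]
        by_cases hc : k+1 ≤ s ∧ s ≤ final
        · rw [if_pos hc, if_pos (by omega)]
        · rw [if_neg hc, if_neg (by omega)]
    · by_cases hs : s = k
      · rw [if_pos hs, hfv, hs, if_pos (show k ≤ k ∧ k ≤ final from ⟨le_refl _, hkf⟩)]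
      · rw [if_neg hs, ihF' s]
        by_cases hc : k+1 ≤ s ∧ s ≤ final
        · rw [if_pos hc, if_pos (by omega)]
        · rw [if_neg hc, if_neg (by omega)]

-- ===== VERDICT (by name: the statement is the Claim_ definition above) =====
theorem f_spec : Claim_equal_f := by
  intro s fi fl _ hpre
  unfold Spec_f
  by_cases h1 : s = fi ∧ (if s = 10 then true else fl) = true
  · simp only [f, fAux, f_alt]
    rw [if_pos h1, if_pos h1]
  · by_cases h2 : s > fi ∨ s = 11 ∨ s = 12
    · simp only [f, fAux, f_alt]
      rw [if_neg h1, if_neg h1, if_pos h2, if_pos h2]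
    · have hs2 : 2 ≤ s := by
        rcases hpre with h | h | h
        · exact h
        · exact absurd (Or.inl h) h2
        · obtain ⟨hsf, hfl⟩ := h
          exact absurd ⟨hsf, by rw [hfl]; simp⟩ h1
      have hsle : s ≤ fi := by omega
      have hL : f s fi fl = G fi s fl :=
        fAux_eq_G fi _ s fl hs2 (by omega)
      have hinv := loop_invariant fi ((fi + 1 - s).toNat) s rfl hs2
      simp only [f_alt]
      rw [if_neg h1, if_neg h2, hL]
      rcases (hinv s) with ⟨hT, hF⟩
      by_cases h10 : s = 10
      · rw [if_pos (show (if s = 10 then true else fl) = true by simp [h10])]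
        rw [hT, if_pos ⟨le_refl _, hsle⟩, h10, G_ten]
      · have hfl : (if s = 10 then true else fl) = fl := if_neg h10
        cases fl with
        | true =>
          rw [if_pos (show (if s = 10 then true else (true:Bool)) = true by simp [h10]),
              hT, if_pos ⟨le_refl _, hsle⟩]
        | false =>
          rw [if_neg (show ¬((if s = 10 then true else (false:Bool)) = true) by simp [h10]),
              hF, if_pos ⟨le_refl _, hsle⟩]
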